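-- pv_equiv track=rewrite | github.com/pypi-data/pypi-mirror-334 | packages/patchcommander/patchcommander-1.2-py3-none-any.whl/patchcommander/core/utils/code_formatter.py | format_method
-- ===== SOURCE A (Python) =====
-- def format_method(method_code: str, base_indent: str = '    ') -> str:
--     lines = method_code.strip().split('\n')
--     if not lines:
--         return ""
--
--     result = []
--     in_decorator = False
--     body_indent = base_indent + "    "
--
--     # First pass - identify decorators and the method signature
--     decorator_lines = []
--     signature_index = -1
--
--     for i, line in enumerate(lines):
--         if line.lstrip().startswith('@'):
--             decorator_lines.append(i)
--         elif line.lstrip().startswith('def '):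
--             signature_index = i
--             break
--
--     # Process the lines
--     for i, line in enumerate(lines):
--         line_strip = line.strip()
--         if not line_strip:
--             result.append("")
--             continue
--
--         if i in decorator_lines:
--             # Format decorator
--             result.append(f"{base_indent}{line_strip}")
--         elif i == signature_index:
--             # Format method signature
--             result.append(f"{base_indent}{line_strip}")
--         else:
--             # Format method body with correct indentation
--             result.append(f"{body_indent}{line_strip}")
--
--     return "\n".join(result)
-- ===== SOURCE B (Python) =====
-- def format_method(method_code: str, base_indent: str = '    ') -> str:
--     body_indent = base_indent + "    "
--     out = []
--     signature_seen = False
--     for line in method_code.strip().split('\n'):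
--         ls = line.lstrip()
--         s = line.strip()
--         if not s:
--             out.append("")
--         elif not signature_seen and ls.startswith('def '):
--             signature_seen = True
--             out.append(base_indent + s)
--         elif not signature_seen and ls.startswith('@'):
--             out.append(base_indent + s)
--         else:
--             out.append(body_indent + s)
--     return "\n".join(out)
-- ===== Notes on version B (the rewrite author's own statement) =====
-- stated objective: simpler
-- what changed: Replaced A's two passes (a first scan building a decorator-index list and a signature index, then a classifying map keyed by those indices) with a single streaming pass that carries one boolean flag signature_seen.
import Mathlib
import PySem

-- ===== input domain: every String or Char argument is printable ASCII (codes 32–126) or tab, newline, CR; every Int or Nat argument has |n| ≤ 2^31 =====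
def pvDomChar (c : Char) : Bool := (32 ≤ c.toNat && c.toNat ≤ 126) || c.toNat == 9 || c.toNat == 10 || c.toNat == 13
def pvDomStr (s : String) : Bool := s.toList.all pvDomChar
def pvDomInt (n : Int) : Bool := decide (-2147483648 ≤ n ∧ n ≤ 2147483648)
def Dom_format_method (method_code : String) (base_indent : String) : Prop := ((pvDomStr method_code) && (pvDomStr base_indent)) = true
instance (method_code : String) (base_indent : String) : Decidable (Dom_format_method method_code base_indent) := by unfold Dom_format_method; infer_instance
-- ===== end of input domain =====

-- B replaces A's two passes (decorator-index list + signature index, then a classifying map)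
-- with a single streaming pass carrying a boolean flag; same output, no speed claim.

-- ===== PORT A =====
-- first pass of A: collect indices of '@'-lines, stop at the first 'def ' line (break), sig = -1 if none
def pvFirstPassA : List (Int × List Char) → List Int × Int
  | [] => ([], -1)
  | (i, l) :: rest =>
    if PySem.Chars.startswith (PySem.Chars.lstrip l) ['@'] then
      let r := pvFirstPassA rest
      (i :: r.1, r.2)
    else if PySem.Chars.startswith (PySem.Chars.lstrip l) "def ".toList then
      ([], i)
    else pvFirstPassA rest

-- second pass of A, per enumerated line
def pvIndentA (base body : List Char) (decs : List Int) (sig : Int) (p : Int × List Char) : List Char :=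
  let s := PySem.Chars.strip p.2
  if s = [] then []
  else if p.1 ∈ decs then base ++ s
  else if p.1 = sig then base ++ s
  else body ++ s

def format_method (method_code : String) (base_indent : String) : String :=
  let lines := PySem.Chars.splitOn (PySem.Chars.strip method_code.toList) ['\n']
  if lines = [] then ""
  else
    let body := base_indent.toList ++ "    ".toList
    let r := pvFirstPassA (PySem.List.enumerate lines)
    String.ofList (PySem.Chars.join ['\n']
      ((PySem.List.enumerate lines).map (pvIndentA base_indent.toList body r.1 r.2)))

-- ===== PORT B =====
-- single pass with a signature_seen flag
def pvLinesB (base body : List Char) : Bool → List (List Char) → List (List Char)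
  | _, [] => []
  | seen, l :: rest =>
    let ls := PySem.Chars.lstrip l
    let s := PySem.Chars.strip l
    if s = [] then [] :: pvLinesB base body seen rest
    else if !seen && PySem.Chars.startswith ls "def ".toList then
      (base ++ s) :: pvLinesB base body true rest
    else if !seen && PySem.Chars.startswith ls ['@'] then
      (base ++ s) :: pvLinesB base body seen rest
    else (body ++ s) :: pvLinesB base body seen rest

def format_method_alt (method_code : String) (base_indent : String) : String :=
  String.ofList (PySem.Chars.join ['\n']
    (pvLinesB base_indent.toList (base_indent.toList ++ "    ".toList) false
      (PySem.Chars.splitOn (PySem.Chars.strip method_code.toList) ['\n'])))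

-- ===== PRECONDITION & SPEC =====
def Spec_format_method (method_code : String) (base_indent : String) (out : String) : Prop := out = format_method_alt method_code base_indent
instance (method_code : String) (base_indent : String) (out : String) : Decidable (Spec_format_method method_code base_indent out) := by unfold Spec_format_method; infer_instance

-- ===== CLAIM (what is proved, stated in full; the proofs are below) =====
def Claim_equal_format_method : Prop := ∀ (method_code : String) (base_indent : String), Dom_format_method method_code base_indent → Spec_format_method method_code base_indent (format_method method_code base_indent)

-- ===== LEMMAS AND PROOFS =====

-- a line whose lstrip starts with a non-space char has nonempty strip
theorem pv_strip_ne_nil (l : List Char) (c : Char) (cs : List Char)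
    (h : PySem.Chars.startswith (PySem.Chars.lstrip l) (c :: cs) = true)
    (hc : PySem.Chars.isspace c = false) : PySem.Chars.strip l ≠ [] := by
  rw [PySem.Chars.startswith_iff] at h
  obtain ⟨t, ht⟩ := h
  intro hnil
  have : ∀ x ∈ (PySem.Chars.lstrip l).reverse, PySem.Chars.isspace x = true := by
    simpa [PySem.Chars.strip, PySem.Chars.rstrip, List.dropWhile_eq_nil_iff] using hnil
  have hcmem : c ∈ (PySem.Chars.lstrip l).reverse := by
    rw [← ht]; simp
  have := this c hcmem
  simp [hc] at this

-- a line that starts with '@' does not start with "def "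
theorem pv_at_not_def (ls : List Char)
    (h : PySem.Chars.startswith ls ['@'] = true) :
    PySem.Chars.startswith ls "def ".toList = false := by
  rw [PySem.Chars.startswith_iff] at h
  obtain ⟨t, ht⟩ := h
  subst ht
  simp [PySem.Chars.startswith, List.isPrefixOf]

-- branch equations for the first pass
theorem pv_fp_at (k : Int) (l : List Char) (e : List (Int × List Char))
    (hat : PySem.Chars.startswith (PySem.Chars.lstrip l) ['@'] = true) :
    pvFirstPassA ((k, l) :: e) = ((k :: (pvFirstPassA e).1, (pvFirstPassA e).2)) := by
  simp [pvFirstPassA, hat]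

theorem pv_fp_def (k : Int) (l : List Char) (e : List (Int × List Char))
    (hat : PySem.Chars.startswith (PySem.Chars.lstrip l) ['@'] = false)
    (hdef : PySem.Chars.startswith (PySem.Chars.lstrip l) "def ".toList = true) :
    pvFirstPassA ((k, l) :: e) = ([], k) := by
  rw [pvFirstPassA, hdef, hat]
  simp

theorem pv_fp_skip (k : Int) (l : List Char) (e : List (Int × List Char))
    (hat : PySem.Chars.startswith (PySem.Chars.lstrip l) ['@'] = false)
    (hdef : PySem.Chars.startswith (PySem.Chars.lstrip l) "def ".toList = false) :
    pvFirstPassA ((k, l) :: e) = pvFirstPassA e := by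
  rw [pvFirstPassA, hdef, hat]
  simp

-- branch equations for B's single pass
theorem pv_lb_blank (seen : Bool) (base body l : List Char) (rest : List (List Char))
    (hnil : PySem.Chars.strip l = []) :
    pvLinesB base body seen (l :: rest) = [] :: pvLinesB base body seen rest := by
  simp [pvLinesB, hnil]

theorem pv_lb_def (base body l : List Char) (rest : List (List Char))
    (hdef : PySem.Chars.startswith (PySem.Chars.lstrip l) "def ".toList = true)
    (hnil : PySem.Chars.strip l ≠ []) :
    pvLinesB base body false (l :: rest) =
      (base ++ PySem.Chars.strip l) :: pvLinesB base body true rest := by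
  rw [pvLinesB, hdef]
  simp [hnil]

theorem pv_lb_at (base body l : List Char) (rest : List (List Char))
    (hat : PySem.Chars.startswith (PySem.Chars.lstrip l) ['@'] = true)
    (hdef : PySem.Chars.startswith (PySem.Chars.lstrip l) "def ".toList = false)
    (hnil : PySem.Chars.strip l ≠ []) :
    pvLinesB base body false (l :: rest) =
      (base ++ PySem.Chars.strip l) :: pvLinesB base body false rest := by
  rw [pvLinesB, hdef, hat]
  simp [hnil]

theorem pv_lb_body (seen : Bool) (base body l : List Char) (rest : List (List Char))
    (hat : PySem.Chars.startswith (PySem.Chars.lstrip l) ['@'] = false)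
    (hdef : PySem.Chars.startswith (PySem.Chars.lstrip l) "def ".toList = false)
    (hnil : PySem.Chars.strip l ≠ []) :
    pvLinesB base body seen (l :: rest) =
      (body ++ PySem.Chars.strip l) :: pvLinesB base body seen rest := by
  rw [pvLinesB, hdef, hat]
  simp [hnil]

theorem pv_lb_seen (base body l : List Char) (rest : List (List Char))
    (hnil : PySem.Chars.strip l ≠ []) :
    pvLinesB base body true (l :: rest) =
      (body ++ PySem.Chars.strip l) :: pvLinesB base body true rest := by
  rw [pvLinesB]
  simp [hnil]

-- head evaluation of A's classifier
theorem pv_ia_blank (base body : List Char) (decs : List Int) (sig k : Int) (l : List Char)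
    (hnil : PySem.Chars.strip l = []) : pvIndentA base body decs sig (k, l) = [] := by
  simp [pvIndentA, hnil]

theorem pv_ia_dec (base body : List Char) (decs : List Int) (sig k : Int) (l : List Char)
    (hnil : PySem.Chars.strip l ≠ []) (hmem : k ∈ decs) :
    pvIndentA base body decs sig (k, l) = base ++ PySem.Chars.strip l := by
  simp [pvIndentA, hnil, hmem]

theorem pv_ia_sig (base body : List Char) (decs : List Int) (k : Int) (l : List Char)
    (hnil : PySem.Chars.strip l ≠ []) (hmem : k ∉ decs) :
    pvIndentA base body decs k (k, l) = base ++ PySem.Chars.strip l := by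
  simp [pvIndentA, hnil, hmem]

theorem pv_ia_body (base body : List Char) (decs : List Int) (sig k : Int) (l : List Char)
    (hnil : PySem.Chars.strip l ≠ []) (hmem : k ∉ decs) (hsig : k ≠ sig) :
    pvIndentA base body decs sig (k, l) = body ++ PySem.Chars.strip l := by
  simp [pvIndentA, hnil, hmem, hsig]

-- indices produced by the first pass on lines enumerated from k are ≥ k
theorem pv_fp_bounds (lines : List (List Char)) : ∀ (k : Int),
    (∀ j ∈ (pvFirstPassA (PySem.List.enumerate lines k)).1, k ≤ j) ∧
    ((pvFirstPassA (PySem.List.enumerate lines k)).2 = -1 ∨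
      k ≤ (pvFirstPassA (PySem.List.enumerate lines k)).2) := by
  induction lines with
  | nil => intro k; simp [PySem.List.enumerate_nil, pvFirstPassA]
  | cons l rest ih =>
    intro k
    obtain ⟨ih1, ih2⟩ := ih (k + 1)
    rw [PySem.List.enumerate_cons]
    by_cases hat : PySem.Chars.startswith (PySem.Chars.lstrip l) ['@'] = true
    · rw [pv_fp_at k l _ hat]
      refine ⟨fun j hj => ?_, ?_⟩
      · rcases List.mem_cons.mp hj with rfl | hj
        · omega
        · have := ih1 j hj; omega
      · rcases ih2 with h | h
        · left; exact h
        · right; omega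
    · replace hat := eq_false_of_ne_true hat
      by_cases hdef : PySem.Chars.startswith (PySem.Chars.lstrip l) "def ".toList = true
      · rw [pv_fp_def k l _ hat hdef]
        exact ⟨by simp, by right; omega⟩
      · rw [pv_fp_skip k l _ hat (eq_false_of_ne_true hdef)]
        refine ⟨fun j hj => by have := ih1 j hj; omega, ?_⟩
        rcases ih2 with h | h
        · left; exact h
        · right; omega

-- after the signature: A's classifier with stale small indices equals B with seen = true
theorem pv_after_def (base body : List Char) (lines : List (List Char)) : ∀ (k : Int)
    (decs : List Int) (sig : Int), (∀ j ∈ decs, j < k) → sig < k →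
    (PySem.List.enumerate lines k).map (pvIndentA base body decs sig) =
      pvLinesB base body true lines := by
  induction lines with
  | nil => intro k decs sig _ _; simp [PySem.List.enumerate_nil, pvLinesB]
  | cons l rest ih =>
    intro k decs sig hd hs
    rw [PySem.List.enumerate_cons, List.map_cons,
      ih (k + 1) decs sig (fun j hj => by have := hd j hj; omega) (by omega)]
    have hkd : k ∉ decs := fun h => absurd (hd k h) (by omega)
    by_cases hnil : PySem.Chars.strip l = []
    · rw [pv_lb_blank _ _ _ _ _ hnil, pv_ia_blank _ _ _ _ _ _ hnil]
    · rw [pv_lb_seen _ _ _ _ hnil, pv_ia_body _ _ _ _ _ _ hnil hkd (by omega)]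

-- main invariant: A's second pass with its first-pass table equals B's single pass, seen = false
theorem pv_main (base body : List Char) (lines : List (List Char)) : ∀ (k : Int)
    (extra : List Int), 0 ≤ k → (∀ j ∈ extra, j < k) →
    (PySem.List.enumerate lines k).map
      (pvIndentA base body (extra ++ (pvFirstPassA (PySem.List.enumerate lines k)).1)
        (pvFirstPassA (PySem.List.enumerate lines k)).2) =
      pvLinesB base body false lines := by
  induction lines with
  | nil => intro k extra _ _; simp [PySem.List.enumerate_nil, pvLinesB]
  | cons l rest ih =>
    intro k extra hk hex
    rw [PySem.List.enumerate_cons]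
    by_cases hat : PySem.Chars.startswith (PySem.Chars.lstrip l) ['@'] = true
    · have hdef := pv_at_not_def _ hat
      have hs := pv_strip_ne_nil l '@' [] hat (by decide)
      rw [pv_fp_at k l _ hat, List.map_cons,
        pv_ia_dec _ _ _ _ _ _ hs (by simp),
        pv_lb_at _ _ _ _ hat hdef hs]
      congr 1
      rw [List.append_cons]
      exact ih (k + 1) (extra ++ [k]) (by omega)
        (fun j hj => by
          rcases List.mem_append.mp hj with h | h
          · have := hex j h; omega
          · simp at h; omega)
    · replace hat := eq_false_of_ne_true hat
      by_cases hdef : PySem.Chars.startswith (PySem.Chars.lstrip l) "def ".toList = true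
      · have hs := pv_strip_ne_nil l 'd' "ef ".toList hdef (by decide)
        have hkd : (k : Int) ∉ extra := fun h => absurd (hex k h) (by omega)
        rw [pv_fp_def k l _ hat hdef, List.map_cons, List.append_nil,
          pv_ia_sig _ _ _ _ _ hs hkd,
          pv_lb_def _ _ _ _ hdef hs,
          pv_after_def base body rest (k + 1) extra k
            (fun j hj => by have := hex j hj; omega) (by omega)]
      · replace hdef := eq_false_of_ne_true hdef
        have hrec := ih (k + 1) extra (by omega) (fun j hj => by have := hex j hj; omega)
        obtain ⟨hb1, hb2⟩ := pv_fp_bounds rest (k + 1)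
        have hkd : (k : Int) ∉ extra ++ (pvFirstPassA (PySem.List.enumerate rest (k + 1))).1 := by
          intro h
          rcases List.mem_append.mp h with h | h
          · exact absurd (hex k h) (by omega)
          · have := hb1 k h; omega
        have hks : k ≠ (pvFirstPassA (PySem.List.enumerate rest (k + 1))).2 := by
          rcases hb2 with h | h <;> omega
        rw [pv_fp_skip k l _ hat hdef, List.map_cons, hrec]
        by_cases hnil : PySem.Chars.strip l = []
        · rw [pv_lb_blank _ _ _ _ _ hnil, pv_ia_blank _ _ _ _ _ _ hnil]
        · rw [pv_lb_body _ _ _ _ _ hat hdef hnil, pv_ia_body _ _ _ _ _ _ hnil hkd hks]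

-- ===== VERDICT (by name: the statement is the Claim_ definition above) =====
theorem format_method_spec : Claim_equal_format_method := by
  intro method_code base_indent _
  unfold Spec_format_method format_method format_method_alt
  cases h : PySem.Chars.splitOn (PySem.Chars.strip method_code.toList) ['\n'] with
  | nil => simp [pvLinesB, PySem.Chars.join, List.intercalate]
  | cons l rest =>
    simp only [if_neg (List.cons_ne_nil l rest)]
    congr 1
    congr 1
    have := pv_main base_indent.toList (base_indent.toList ++ "    ".toList)
      (l :: rest) 0 [] le_rfl (by simp)
    simpa using this
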